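-- pv_equiv track=rewrite | github.com/dblyon/protover | app/filterresults.py | _findgap_v2
-- ===== SOURCE A (Python) =====
-- def _findgap_v2(expmips):
--     '''
--     List (of expmips: [mz, int, x15N]) --> List(of x15N positions to delete)
--     '''
--     x15N_list = []
--     for index, mips in enumerate(expmips):
--         x15N = mips[-1]
--         if x15N != index:
--             x15N_all = [ele[-1] for ele in expmips]
--             return sorted(list(set(x15N_all) - set(x15N_list)))
--         else:
--             x15N_list.append(x15N)
--     return []
-- ===== SOURCE B (Python) =====
-- def _findgap_v2(expmips):
--     lasts = [mips[-1] for mips in expmips]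
--     mismatches = [i for i, x in enumerate(lasts) if x != i]
--     if not mismatches:
--         return []
--     gap = min(mismatches)
--     return sorted({x for x in lasts if x < 0 or x >= gap})
-- ===== Notes on version B (the rewrite author's own statement) =====
-- stated objective: alternative
-- what changed: B drops A's early-return loop with its incrementally-built x15N_list and set-difference: it collects ALL mismatch indices from an enumerate-filter pass, takes their minimum as the gap, and then sorts the distinct last-elements kept by an arithmetic filter (x < 0 or x >= gap) instead of subtracting a set.
import Mathlib
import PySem

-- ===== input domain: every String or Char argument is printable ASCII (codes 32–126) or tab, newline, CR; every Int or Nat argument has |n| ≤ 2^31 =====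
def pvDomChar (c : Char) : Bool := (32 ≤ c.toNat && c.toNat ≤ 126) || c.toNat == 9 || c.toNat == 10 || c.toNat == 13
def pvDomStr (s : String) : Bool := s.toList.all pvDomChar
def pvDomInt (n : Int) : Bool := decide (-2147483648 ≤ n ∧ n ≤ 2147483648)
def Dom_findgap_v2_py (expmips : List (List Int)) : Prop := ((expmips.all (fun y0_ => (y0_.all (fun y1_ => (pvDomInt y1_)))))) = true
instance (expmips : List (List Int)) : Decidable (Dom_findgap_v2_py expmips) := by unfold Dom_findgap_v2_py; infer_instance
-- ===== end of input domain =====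

-- B replaces A's early-returning loop + set-difference by: collect all mismatch indices,
-- take their min as the gap, then sort the last-elements filtered by an arithmetic
-- comparison (x < 0 or x >= gap); objective: alternative decomposition, same cost.


-- ===== PORT A =====
-- mips[-1]; exact under Pre_ (every inner list nonempty)
def pvLast (l : List Int) : Int := PySem.List.pyGetD l (-1) 0

-- the for-loop of A: state = (remaining list, index, x15N_list accumulator)
def findgapLoopA (all : List (List Int)) : List (List Int) → Int → List Int → List Int
  | [], _, _ => []
  | mips :: rest, index, acc =>
      let x15N := pvLast mips
      if x15N ≠ index then
        PySem.List.sorted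
          (PySem.Set.diff (PySem.Set.ofList (all.map (fun ele => pvLast ele))) acc)
          (fun e => e) false
      else findgapLoopA all rest (index + 1) (acc ++ [x15N])

def findgap_v2_py (expmips : List (List Int)) : List Int :=
  findgapLoopA expmips expmips 0 []

-- ===== PORT B =====
def findgap_v2_py_alt (expmips : List (List Int)) : List Int :=
  let lasts := expmips.map (fun mips => pvLast mips)
  let mismatches :=
    ((PySem.List.enumerate lasts).filter (fun p => p.2 ≠ p.1)).map (fun p => p.1)
  match PySem.List.min? mismatches (fun i => i) with
  | none => []
  | some gap =>
      PySem.List.sorted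
        (PySem.Set.ofList (lasts.filter (fun x => decide (x < 0) || decide (gap ≤ x))))
        (fun e => e) false

-- ===== PRECONDITION & SPEC =====
-- Pre_ excludes inputs containing an empty inner list, on which Python A raises IndexError (mips[-1]).
def Pre_findgap_v2_py (expmips : List (List Int)) : Prop := ∀ l ∈ expmips, l ≠ []
instance (expmips : List (List Int)) : Decidable (Pre_findgap_v2_py expmips) := by unfold Pre_findgap_v2_py; infer_instance
def pvWitness_findgap_v2_py : List (List Int) := [[1, 0], [3, 5]]

def Spec_findgap_v2_py (expmips : List (List Int)) (out : List Int) : Prop := out = findgap_v2_py_alt expmips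
instance (expmips : List (List Int)) (out : List Int) : Decidable (Spec_findgap_v2_py expmips out) := by unfold Spec_findgap_v2_py; infer_instance

-- ===== CLAIM (what is proved, stated in full; the proofs are below) =====
def Claim_equal_findgap_v2_py : Prop := ∀ (expmips : List (List Int)), Dom_findgap_v2_py expmips → Pre_findgap_v2_py expmips → Spec_findgap_v2_py expmips (findgap_v2_py expmips)

-- ===== LEMMAS AND PROOFS =====

-- proof-only helper: the first index i (from idx) with pvLast (rest[i]) ≠ i
def firstMismatch : List (List Int) → Int → Option Int
  | [], _ => none
  | mips :: rest, i => if pvLast mips ≠ i then some i else firstMismatch rest (i + 1)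

-- A's accumulator at index `idx` is literally list(range(idx)); with that invariant the loop
-- computes sorted(set(all lasts) - set(range(gap))) at the first mismatch `gap` (or []).
theorem findgapLoopA_eq_firstMismatch (all : List (List Int)) :
    ∀ (rest : List (List Int)) (idx : Int), 0 ≤ idx →
      findgapLoopA all rest idx (PySem.List.pyRange 0 idx 1) =
        match firstMismatch rest idx with
        | none => []
        | some gap =>
            PySem.List.sorted
              (PySem.Set.diff (PySem.Set.ofList (all.map (fun ele => pvLast ele)))
                (PySem.Set.ofList (PySem.List.pyRange 0 gap 1)))
              (fun e => e) false := by
  intro rest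
  induction rest with
  | nil => intro idx _; simp [findgapLoopA, firstMismatch]
  | cons mips rest ih =>
      intro idx hidx
      by_cases h : pvLast mips = idx
      · simp only [findgapLoopA, firstMismatch, h, ne_eq, not_true_eq_false, if_neg,
          not_false_eq_true]
        rw [show PySem.List.pyRange 0 idx 1 ++ [idx] = PySem.List.pyRange 0 (idx + 1) 1 from
          (PySem.List.pyRange_one_succ_right hidx).symm]
        exact ih (idx + 1) (by omega)
      · simp only [findgapLoopA, firstMismatch, h, ne_eq, not_false_eq_true, if_pos]
        rw [PySem.Set.ofList_eq_self_of_nodup (PySem.List.pyRange 0 idx 1)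
          (PySem.List.nodup_pyRange_one 0 idx)]

-- min of a strictly increasing Int list is its head
theorem foldl_min_eq_self (t : List Int) :
    ∀ b, (∀ y ∈ t, b ≤ y) → t.foldl min b = b := by
  induction t with
  | nil => intro b _; rfl
  | cons c t ih =>
      intro b hb
      simp only [List.foldl_cons]
      rw [min_eq_left (hb c (by simp))]
      exact ih b (fun y hy => hb y (by simp [hy]))

theorem min?_id_eq_head_of_pairwise_lt (l : List Int)
    (h : l.Pairwise (· < ·)) : PySem.List.min? l (fun x => x) = l.head? := by
  cases l with
  | nil => rfl
  | cons a t =>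
      rw [PySem.List.min?_id_cons]
      have hle : ∀ y ∈ t, a ≤ y := fun y hy => le_of_lt ((List.pairwise_cons.mp h).1 y hy)
      simp [foldl_min_eq_self t a hle]

-- the head of B's mismatch-index list is exactly A's first-mismatch scan
theorem head_mismatches_eq_firstMismatch :
    ∀ (rest : List (List Int)) (i : Int),
      ((((PySem.List.enumerate (rest.map (fun mips => pvLast mips)) i).filter
          (fun p => p.2 ≠ p.1)).map (fun p => p.1))).head? = firstMismatch rest i := by
  intro rest
  induction rest with
  | nil => intro i; rfl
  | cons mips rest ih =>
      intro i
      simp only [List.map_cons, PySem.List.enumerate_cons]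
      by_cases h : pvLast mips = i
      · simp only [firstMismatch, h, ne_eq, not_true_eq_false, if_neg, not_false_eq_true,
          List.filter_cons, decide_eq_true_eq]
        simpa using ih (i + 1)
      · simp [firstMismatch, h]

-- B's mismatch-index list is strictly increasing
theorem pairwise_mismatches (lasts : List Int) (i : Int) :
    ((((PySem.List.enumerate lasts i).filter (fun p => p.2 ≠ p.1)).map
        (fun p => p.1))).Pairwise (· < ·) := by
  have h := PySem.List.pairwise_lt_enumerate lasts i
  exact (h.filter _).map _ (fun a b hab => hab)

-- sorted(set(lasts) - set(range(g))) = sorted({x in lasts | x < 0 or g ≤ x})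
theorem sorted_diff_eq_sorted_filter (lasts : List Int) (g : Int) :
    PySem.List.sorted
        (PySem.Set.diff (PySem.Set.ofList lasts)
          (PySem.Set.ofList (PySem.List.pyRange 0 g 1)))
        (fun e => e) false =
    PySem.List.sorted
        (PySem.Set.ofList (lasts.filter (fun x => decide (x < 0) || decide (g ≤ x))))
        (fun e => e) false := by
  apply PySem.List.sorted_eq_sorted_of_perm _ _ _ (fun a b hab => hab)
  rw [List.perm_ext_iff_of_nodup
    (PySem.Set.nodup_diff _ _ (PySem.Set.nodup_ofList lasts))
    (PySem.Set.nodup_ofList _)]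
  intro x
  simp only [PySem.Set.mem_diff, PySem.Set.mem_ofList, List.mem_filter,
    PySem.List.mem_pyRange_one]
  constructor
  · rintro ⟨hx, hn⟩
    exact ⟨hx, by simp only [Bool.or_eq_true, decide_eq_true_eq]; omega⟩
  · rintro ⟨hx, hc⟩
    simp only [Bool.or_eq_true, decide_eq_true_eq] at hc
    exact ⟨hx, by omega⟩

-- ===== VERDICT (by name: the statement is the Claim_ definition above) =====
theorem findgap_v2_py_spec : Claim_equal_findgap_v2_py := by
  intro expmips _ _
  unfold Spec_findgap_v2_py findgap_v2_py findgap_v2_py_alt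
  have hA := findgapLoopA_eq_firstMismatch expmips expmips 0 le_rfl
  rw [show PySem.List.pyRange 0 0 1 = [] from rfl] at hA
  rw [hA]
  simp only [min?_id_eq_head_of_pairwise_lt _ (pairwise_mismatches _ 0),
    head_mismatches_eq_firstMismatch expmips 0]
  cases firstMismatch expmips 0 with
  | none => rfl
  | some gap => exact sorted_diff_eq_sorted_filter _ gap
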